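-- pv_equiv track=rewrite | github.com/signalnine/tildebin | k8s_workload_restart_age_analyzer.py | categorize_by_age
-- ===== SOURCE A (Python) =====
-- def categorize_by_age(pods_analysis, stale_days=30, fresh_hours=1):
--     """
--     Categorize pods by age.
--
--     Returns dict with:
--     - stale: pods older than stale_days
--     - normal: pods in healthy age range
--     - fresh: pods younger than fresh_hours (recently deployed/restarted)
--     """
--     stale_seconds = stale_days * 86400
--     fresh_seconds = fresh_hours * 3600
--
--     categories = {
--         'stale': [],
--         'normal': [],
--         'fresh': []
--     }
--
--     for pod in pods_analysis:
--         age = pod['age_seconds']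
--         if age < 0:
--             continue
--
--         if age > stale_seconds:
--             categories['stale'].append(pod)
--         elif age < fresh_seconds:
--             categories['fresh'].append(pod)
--         else:
--             categories['normal'].append(pod)
--
--     return categories
-- ===== SOURCE B (Python) =====
-- def categorize_by_age(pods_analysis, stale_days=30, fresh_hours=1):
--     """Categorize pods by age: three independent filter passes, one per category."""
--     stale_seconds = stale_days * 86400
--     fresh_seconds = fresh_hours * 3600
--     return {
--         'stale': [p for p in pods_analysis
--                   if 0 <= p['age_seconds'] and p['age_seconds'] > stale_seconds],
--         'normal': [p for p in pods_analysis
--                    if 0 <= p['age_seconds'] <= stale_seconds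
--                    and p['age_seconds'] >= fresh_seconds],
--         'fresh': [p for p in pods_analysis
--                   if 0 <= p['age_seconds'] <= stale_seconds
--                   and p['age_seconds'] < fresh_seconds],
--     }
-- ===== Notes on version B (the rewrite author's own statement) =====
-- stated objective: alternative
-- what changed: Replaces the single stateful loop with mutually-exclusive if/elif branches by three independent filter passes over the input, one per category, each with an explicit closed-form boundary predicate.
import Mathlib
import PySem

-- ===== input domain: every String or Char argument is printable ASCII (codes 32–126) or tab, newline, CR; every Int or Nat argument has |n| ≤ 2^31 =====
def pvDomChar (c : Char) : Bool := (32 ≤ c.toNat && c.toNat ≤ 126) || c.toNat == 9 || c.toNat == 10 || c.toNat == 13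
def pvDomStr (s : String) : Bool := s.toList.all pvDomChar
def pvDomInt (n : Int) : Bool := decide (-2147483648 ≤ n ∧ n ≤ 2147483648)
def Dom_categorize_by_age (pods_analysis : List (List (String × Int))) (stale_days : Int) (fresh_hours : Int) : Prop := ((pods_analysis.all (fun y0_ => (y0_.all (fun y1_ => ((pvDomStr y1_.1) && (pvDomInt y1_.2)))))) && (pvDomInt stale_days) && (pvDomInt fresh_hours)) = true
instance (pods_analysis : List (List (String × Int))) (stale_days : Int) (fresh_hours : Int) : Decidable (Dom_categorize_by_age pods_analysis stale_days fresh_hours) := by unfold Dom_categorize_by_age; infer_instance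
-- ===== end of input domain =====

-- B replaces A's single if/elif loop by three independent filter passes, one per category (alternative decomposition, same cost).

-- ===== PORT A =====
-- pod['age_seconds'] on an assoc-list dict: first matching key (none = KeyError, excluded by Pre_)
def pvAge? (pod : List (String × Int)) : Option Int :=
  (pod.find? (fun kv => kv.1 == "age_seconds")).map (·.2)

-- A's loop: one pass accumulating the three category lists (stale, normal, fresh) in order
def pvLoopA (stale_seconds fresh_seconds : Int) :
    List (List (String × Int)) →
    List (List (String × Int)) → List (List (String × Int)) → List (List (String × Int)) →
    List (List (String × Int)) × List (List (String × Int)) × List (List (String × Int))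
  | [], st, no, fr => (st, no, fr)
  | pod :: rest, st, no, fr =>
    match pvAge? pod with
    | none => (st, no, fr)   -- KeyError in Python; outside Pre_
    | some age =>
      if age < 0 then pvLoopA stale_seconds fresh_seconds rest st no fr
      else if age > stale_seconds then pvLoopA stale_seconds fresh_seconds rest (st ++ [pod]) no fr
      else if age < fresh_seconds then pvLoopA stale_seconds fresh_seconds rest st no (fr ++ [pod])
      else pvLoopA stale_seconds fresh_seconds rest st (no ++ [pod]) fr

def categorize_by_age (pods_analysis : List (List (String × Int))) (stale_days : Int) (fresh_hours : Int) : List (String × List (List (String × Int))) :=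
  let stale_seconds := stale_days * 86400
  let fresh_seconds := fresh_hours * 3600
  let r := pvLoopA stale_seconds fresh_seconds pods_analysis [] [] []
  [("stale", r.1), ("normal", r.2.1), ("fresh", r.2.2)]

-- ===== PORT B =====
def categorize_by_age_alt (pods_analysis : List (List (String × Int))) (stale_days : Int) (fresh_hours : Int) : List (String × List (List (String × Int))) :=
  let stale_seconds := stale_days * 86400
  let fresh_seconds := fresh_hours * 3600
  [("stale", pods_analysis.filter (fun p =>
      match pvAge? p with
      | some a => decide (0 ≤ a ∧ stale_seconds < a)
      | none => false)),
   ("normal", pods_analysis.filter (fun p =>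
      match pvAge? p with
      | some a => decide (0 ≤ a ∧ a ≤ stale_seconds ∧ fresh_seconds ≤ a)
      | none => false)),
   ("fresh", pods_analysis.filter (fun p =>
      match pvAge? p with
      | some a => decide (0 ≤ a ∧ a ≤ stale_seconds ∧ a < fresh_seconds)
      | none => false))]

-- ===== PRECONDITION & SPEC =====
-- Pre_: every pod dict has the 'age_seconds' key; otherwise Python A raises KeyError.
def Pre_categorize_by_age (pods_analysis : List (List (String × Int))) (stale_days : Int) (fresh_hours : Int) : Prop :=
  ∀ pod ∈ pods_analysis, (pvAge? pod).isSome
instance (pods_analysis : List (List (String × Int))) (stale_days : Int) (fresh_hours : Int) : Decidable (Pre_categorize_by_age pods_analysis stale_days fresh_hours) := by unfold Pre_categorize_by_age; infer_instance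

def pvWitness_categorize_by_age : (List (List (String × Int))) × Int × Int :=
  ([[("age_seconds", 5000)], [("age_seconds", 9999999)], [("age_seconds", -3)]], 30, 1)

def Spec_categorize_by_age (pods_analysis : List (List (String × Int))) (stale_days : Int) (fresh_hours : Int) (out : List (String × List (List (String × Int)))) : Prop := out = categorize_by_age_alt pods_analysis stale_days fresh_hours
instance (pods_analysis : List (List (String × Int))) (stale_days : Int) (fresh_hours : Int) (out : List (String × List (List (String × Int)))) : Decidable (Spec_categorize_by_age pods_analysis stale_days fresh_hours out) := by unfold Spec_categorize_by_age; infer_instance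

-- ===== CLAIM (what is proved, stated in full; the proofs are below) =====
def Claim_equal_categorize_by_age : Prop := ∀ (pods_analysis : List (List (String × Int))) (stale_days : Int) (fresh_hours : Int), Dom_categorize_by_age pods_analysis stale_days fresh_hours → Pre_categorize_by_age pods_analysis stale_days fresh_hours → Spec_categorize_by_age pods_analysis stale_days fresh_hours (categorize_by_age pods_analysis stale_days fresh_hours)

-- ===== LEMMAS AND PROOFS =====

-- Loop invariant: pvLoopA appends, to each accumulator, exactly the pods passing the corresponding filter.
theorem pvLoopA_eq (ss fs : Int) (pods : List (List (String × Int)))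
    (h : ∀ pod ∈ pods, (pvAge? pod).isSome)
    (st no fr : List (List (String × Int))) :
    pvLoopA ss fs pods st no fr =
      (st ++ pods.filter (fun p => match pvAge? p with
          | some a => decide (0 ≤ a ∧ ss < a) | none => false),
       no ++ pods.filter (fun p => match pvAge? p with
          | some a => decide (0 ≤ a ∧ a ≤ ss ∧ fs ≤ a) | none => false),
       fr ++ pods.filter (fun p => match pvAge? p with
          | some a => decide (0 ≤ a ∧ a ≤ ss ∧ a < fs) | none => false)) := by
  induction pods generalizing st no fr with
  | nil => simp [pvLoopA]
  | cons pod rest ih =>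
    have hpod := h pod (List.mem_cons_self ..)
    have hrest : ∀ p ∈ rest, (pvAge? p).isSome := fun p hp => h p (List.mem_cons_of_mem _ hp)
    obtain ⟨a, ha⟩ := Option.isSome_iff_exists.mp hpod
    by_cases h1 : a < 0
    · have e1 : (decide (0 ≤ a ∧ ss < a)) = false := by simp; omega
      have e2 : (decide (0 ≤ a ∧ a ≤ ss ∧ fs ≤ a)) = false := by simp; omega
      have e3 : (decide (0 ≤ a ∧ a ≤ ss ∧ a < fs)) = false := by simp; omega
      simp only [pvLoopA, ha, if_pos h1, ih hrest, List.filter_cons, e1, e2, e3,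
        Bool.false_eq_true, if_false]
    · by_cases h2 : a > ss
      · have e1 : (decide (0 ≤ a ∧ ss < a)) = true := by simp; omega
        have e2 : (decide (0 ≤ a ∧ a ≤ ss ∧ fs ≤ a)) = false := by simp; omega
        have e3 : (decide (0 ≤ a ∧ a ≤ ss ∧ a < fs)) = false := by simp; omega
        simp only [pvLoopA, ha, if_neg h1, if_pos h2, ih hrest, List.filter_cons, e1, e2, e3,
          Bool.false_eq_true, if_false, if_true, List.append_assoc, List.singleton_append]
      · by_cases h3 : a < fs
        · have e1 : (decide (0 ≤ a ∧ ss < a)) = false := by simp; omega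
          have e2 : (decide (0 ≤ a ∧ a ≤ ss ∧ fs ≤ a)) = false := by simp; omega
          have e3 : (decide (0 ≤ a ∧ a ≤ ss ∧ a < fs)) = true := by simp; omega
          simp only [pvLoopA, ha, if_neg h1, if_neg h2, if_pos h3, ih hrest, List.filter_cons,
            e1, e2, e3, Bool.false_eq_true, if_false, if_true, List.append_assoc,
            List.singleton_append]
        · have e1 : (decide (0 ≤ a ∧ ss < a)) = false := by simp; omega
          have e2 : (decide (0 ≤ a ∧ a ≤ ss ∧ fs ≤ a)) = true := by simp; omega
          have e3 : (decide (0 ≤ a ∧ a ≤ ss ∧ a < fs)) = false := by simp; omega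
          simp only [pvLoopA, ha, if_neg h1, if_neg h2, if_neg h3, ih hrest, List.filter_cons,
            e1, e2, e3, Bool.false_eq_true, if_false, if_true, List.append_assoc,
            List.singleton_append]

-- ===== VERDICT (by name: the statement is the Claim_ definition above) =====
theorem categorize_by_age_spec : Claim_equal_categorize_by_age := by
  intro pods sd fh _ hpre
  unfold Spec_categorize_by_age categorize_by_age categorize_by_age_alt
  simp only [pvLoopA_eq _ _ _ hpre, List.nil_append]
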